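-- pv_equiv track=rewrite | github.com/Ashiq-am/Path-of-Python | 35.Python Utility/Cryptophasia Code in Python/Cryptophasia Code in Python.py | CleConvStr2List
-- ===== SOURCE A (Python) =====
-- def CleConvStr2List(text):
--     A, B, C = ([] for i in range(3))
--
--     # Split line into words
--     A = text.split()
--
--     # Removing special chars from word
--     for i in range(len(A)):
--         B.append(''.join(e for e in A[i] if e.isalnum()))
--
--     while ('' in B):
--         B.remove("")
--
--     # Split word into chars
--     for i in range(len(B)):
--         C.append(list(B[i]))
--
--     return C
-- ===== SOURCE B (Python) =====
-- def CleConvStr2List(text):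
--     return [[c for c in word if c.isalnum()]
--             for word in text.split()
--             if any(c.isalnum() for c in word)]
-- ===== Notes on version B (the rewrite author's own statement) =====
-- stated objective: simpler
-- what changed: Single filter+map comprehension over the split words that builds each char list directly, replacing A's three passes (join-cleaning pass, repeated ''-in/remove scan loop, char-split pass) and its intermediate cleaned-string list.
import Mathlib
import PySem

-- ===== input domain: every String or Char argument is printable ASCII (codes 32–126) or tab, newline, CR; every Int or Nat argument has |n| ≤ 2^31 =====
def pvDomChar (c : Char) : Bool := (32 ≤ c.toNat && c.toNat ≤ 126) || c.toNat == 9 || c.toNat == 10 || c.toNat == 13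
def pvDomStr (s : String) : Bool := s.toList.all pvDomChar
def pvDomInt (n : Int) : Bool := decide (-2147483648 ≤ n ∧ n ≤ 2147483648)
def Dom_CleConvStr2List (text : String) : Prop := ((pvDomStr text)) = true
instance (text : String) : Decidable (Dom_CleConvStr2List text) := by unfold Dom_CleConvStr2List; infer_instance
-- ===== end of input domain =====

-- B replaces A's three passes (clean-and-join, repeated ''-removal scan, char split) by
-- one filter+map comprehension that builds each word's char list directly (objective: simpler).

-- ===== PORT A =====
-- while ('' in B): B.remove("")  — Python remove deletes the first occurrence = List.erase
def pvWhileRemoveEmpty (b : List String) : List String :=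
  if "" ∈ b then pvWhileRemoveEmpty (b.erase "") else b
termination_by b.length
decreasing_by have := List.length_erase_add_one (a := "") (l := b) (by assumption); omega

def CleConvStr2List (text : String) : List (List String) :=
  -- A = text.split()
  let A := PySem.Str.split₀ text
  -- B.append(''.join(e for e in A[i] if e.isalnum()))  (join of chars = the string of those chars)
  let B := A.map (fun w => String.ofList (w.toList.filter PySem.Chars.isalnum))
  let B := pvWhileRemoveEmpty B
  -- C.append(list(B[i]))
  B.map (fun w => w.toList.map (fun c => String.ofList [c]))

-- ===== PORT B =====
def CleConvStr2List_alt (text : String) : List (List String) :=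
  ((PySem.Str.split₀ text).filter (fun w => w.toList.any PySem.Chars.isalnum)).map
    (fun w => (w.toList.filter PySem.Chars.isalnum).map (fun c => String.ofList [c]))

-- ===== PRECONDITION & SPEC =====
def Spec_CleConvStr2List (text : String) (out : List (List String)) : Prop := out = CleConvStr2List_alt text
instance (text : String) (out : List (List String)) : Decidable (Spec_CleConvStr2List text out) := by unfold Spec_CleConvStr2List; infer_instance

-- ===== CLAIM (what is proved, stated in full; the proofs are below) =====
def Claim_equal_CleConvStr2List : Prop := ∀ (text : String), Dom_CleConvStr2List text → Spec_CleConvStr2List text (CleConvStr2List text)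

-- ===== LEMMAS AND PROOFS =====

-- erasing one element on which p is false does not change the filter
theorem pv_filter_erase (l : List String) (a : String) (p : String → Bool) (hp : p a = false) :
    (l.erase a).filter p = l.filter p := by
  induction l with
  | nil => rfl
  | cons x t ih =>
    by_cases hx : x = a
    · subst hx; simp [List.erase_cons_head, hp]
    · rw [List.erase_cons_tail (by simpa using hx)]
      simp [List.filter_cons, ih]

-- the while-loop removes exactly the empty strings
theorem pvWhileRemoveEmpty_eq (b : List String) :
    pvWhileRemoveEmpty b = b.filter (fun w => w ≠ "") := by
  induction b using pvWhileRemoveEmpty.induct with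
  | case1 b hmem ih =>
    rw [pvWhileRemoveEmpty, if_pos hmem, ih,
      pv_filter_erase b "" (fun w => w ≠ "") (by simp)]
  | case2 b hmem =>
    rw [pvWhileRemoveEmpty, if_neg hmem]
    symm
    apply List.filter_eq_self.2
    intro x hx
    simp only [ne_eq, decide_eq_true_eq]
    intro h; exact hmem (h ▸ hx)

-- ===== VERDICT (by name: the statement is the Claim_ definition above) =====
theorem CleConvStr2List_spec : Claim_equal_CleConvStr2List := by
  intro text _
  unfold Spec_CleConvStr2List CleConvStr2List CleConvStr2List_alt
  simp only [pvWhileRemoveEmpty_eq, List.filter_map, List.map_map]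
  congr 1
  · funext w
    simp [Function.comp]
  · apply List.filter_congr
    intro w _
    simp only [Function.comp]
    cases hc : w.toList.any PySem.Chars.isalnum with
    | false =>
      have h0 : w.toList.filter PySem.Chars.isalnum = [] :=
        List.filter_eq_nil_iff.mpr (by simpa [List.any_eq_false] using hc)
      simp [h0]
    | true =>
      have h1 : w.toList.filter PySem.Chars.isalnum ≠ [] := by
        obtain ⟨c, hcm, hp⟩ := List.any_eq_true.mp hc
        intro h; exact (List.filter_eq_nil_iff.mp h) c hcm hp
      simp [h1]
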